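-- pv_equiv track=rewrite | github.com/kit8nino/2022-MP | 429/Жаркова Ксения/lab-1/lab-1.py | getLabirint
-- ===== SOURCE A (Python) =====
-- def getLabirint(walls, path1, path2):
--     n = len(walls)
--     m = len(walls[0])
--     s = ''
--
--     finish1 = path1[-1]
--     path1 = set(path1[:-1])
--
--     path2 = set(path2[:-1])
--
--     for i in range(n):
--         for j in range(m):
--             c = '#'
--             if walls[i][j] == 0:
--                 if (i, j) in path1 and (i, j) in path2:
--                     c = ';'
--                 elif (i, j) in path1:
--                     c = '.'
--                 elif (i, j) in path2:
--                     c = ','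
--                 elif (i, j) == finish1:
--                     c = '*'
--                 else:
--                     c = ' '
--             s += c
--         s += '\n'
--     return s
-- ===== SOURCE B (Python) =====
-- def getLabirint(walls, path1, path2):
--     n = len(walls)
--     m = len(walls[0])
--     grid = [['#' if walls[i][j] != 0 else ' ' for j in range(m)] for i in range(n)]
--
--     def free(i, j):
--         return 0 <= i < n and 0 <= j < m and walls[i][j] == 0
--
--     fi, fj = path1[-1]
--     if free(fi, fj):
--         grid[fi][fj] = '*'
--     for (i, j) in set(path2[:-1]):
--         if free(i, j):
--             grid[i][j] = ','
--     for (i, j) in set(path1[:-1]):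
--         if free(i, j):
--             grid[i][j] = ';' if grid[i][j] == ',' else '.'
--     return ''.join(''.join(row) + '\n' for row in grid)
-- ===== Notes on version B (the rewrite author's own statement) =====
-- stated objective: alternative
-- what changed: B renders by painting: it builds the wall grid once, then overwrites only the path cells in precedence order (finish '*', then path2 ',', then path1 '.'/';'), instead of A's five-way membership cascade evaluated at every cell.
import Mathlib
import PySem

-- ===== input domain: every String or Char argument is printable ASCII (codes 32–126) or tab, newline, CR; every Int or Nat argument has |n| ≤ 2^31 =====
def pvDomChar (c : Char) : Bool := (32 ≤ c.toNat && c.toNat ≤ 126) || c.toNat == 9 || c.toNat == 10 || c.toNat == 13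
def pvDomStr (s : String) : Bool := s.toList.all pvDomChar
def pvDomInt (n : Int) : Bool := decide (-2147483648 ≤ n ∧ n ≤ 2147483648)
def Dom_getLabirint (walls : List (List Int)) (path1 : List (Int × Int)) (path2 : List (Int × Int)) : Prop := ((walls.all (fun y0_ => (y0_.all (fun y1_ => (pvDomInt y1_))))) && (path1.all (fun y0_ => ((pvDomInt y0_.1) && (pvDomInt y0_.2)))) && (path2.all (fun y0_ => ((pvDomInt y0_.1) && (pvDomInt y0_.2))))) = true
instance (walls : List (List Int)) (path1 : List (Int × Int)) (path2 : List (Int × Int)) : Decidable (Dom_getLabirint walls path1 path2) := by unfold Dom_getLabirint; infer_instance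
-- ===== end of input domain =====

-- B renders the maze by PAINTING: build the wall grid once, then overwrite only the path cells
-- (finish, then path2, then path1) instead of A's per-cell membership cascade; objective:
-- alternative decomposition, same cost.

-- ===== PORT A =====
-- walls[i][j]: i is always in range; a row shorter than m would raise IndexError in Python —
-- such inputs are excluded by Pre_, so the getD defaults below are never reached under Pre_.
def getLabirint (walls : List (List Int)) (path1 : List (Int × Int)) (path2 : List (Int × Int)) : String :=
  let n : Int := walls.length
  let m : Int := ((PySem.List.pyGet? walls 0).getD []).length
  let finish1 : Int × Int := (PySem.List.pyGet? path1 (-1)).getD (0, 0)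
  let p1 : PySem.Set (Int × Int) := PySem.Set.ofList (PySem.List.slice path1 none (some (-1)))
  let p2 : PySem.Set (Int × Int) := PySem.Set.ofList (PySem.List.slice path2 none (some (-1)))
  let s : List Char :=
    (PySem.List.pyRange 0 n 1).foldl (fun s i =>
      ((PySem.List.pyRange 0 m 1).foldl (fun s j =>
        let c : Char :=
          if PySem.List.pyGetD (PySem.List.pyGetD walls i []) j 1 == 0 then
            if p1.contains (i, j) && p2.contains (i, j) then ';'
            else if p1.contains (i, j) then '.'
            else if p2.contains (i, j) then ','
            else if (i, j) == finish1 then '*'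
            else ' '
          else '#'
        s ++ [c]) s) ++ ['\n']) []
  String.ofList s

-- ===== PORT B =====
-- free(i,j) of Source B; walls[i][j] is only read with 0 ≤ i < n, 0 ≤ j < m (a row shorter than m,
-- excluded by Pre_, is the only way the getD default can be reached).
def pvFree (walls : List (List Int)) (n m : Int) (i j : Int) : Bool :=
  decide (0 ≤ i) && decide (i < n) && decide (0 ≤ j) && decide (j < m) &&
    (PySem.List.pyGetD (PySem.List.pyGetD walls i []) j 1 == 0)

-- grid[i][j] (current value; only read in range under pvFree)
def pvGet2 (g : List (List Char)) (k l : Nat) : Char := (g.getD k []).getD l ' '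

-- grid[i][j] = c; only called under pvFree, so i, j are nonnegative in-range indices.
def pvSet2 (g : List (List Char)) (i j : Int) (c : Char) : List (List Char) :=
  g.set i.toNat ((g.getD i.toNat []).set j.toNat c)

-- the wall-grid comprehension of Source B
def pvGrid0 (walls : List (List Int)) (n m : Int) : List (List Char) :=
  (PySem.List.pyRange 0 n 1).map (fun i =>
    (PySem.List.pyRange 0 m 1).map (fun j =>
      if PySem.List.pyGetD (PySem.List.pyGetD walls i []) j 1 != 0 then '#' else ' '))

def getLabirint_alt (walls : List (List Int)) (path1 : List (Int × Int)) (path2 : List (Int × Int)) : String :=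
  let n : Int := walls.length
  let m : Int := ((PySem.List.pyGet? walls 0).getD []).length
  let grid0 : List (List Char) := pvGrid0 walls n m
  let f : Int × Int := (PySem.List.pyGet? path1 (-1)).getD (0, 0)
  let g1 := if pvFree walls n m f.1 f.2 then pvSet2 grid0 f.1 f.2 '*' else grid0
  let g2 := (PySem.Set.ofList (PySem.List.slice path2 none (some (-1)))).foldl
      (fun g c => if pvFree walls n m c.1 c.2 then pvSet2 g c.1 c.2 ',' else g) g1
  let g3 := (PySem.Set.ofList (PySem.List.slice path1 none (some (-1)))).foldl
      (fun g c => if pvFree walls n m c.1 c.2 then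
          pvSet2 g c.1 c.2 (if pvGet2 g c.1.toNat c.2.toNat == ',' then ';' else '.') else g) g2
  String.ofList ((g3.map (fun row => row ++ ['\n'])).flatten)

-- ===== PRECONDITION & SPEC =====
-- Pre_ excludes exactly the inputs where Python A raises: walls == [] (walls[0] IndexError),
-- path1 == [] (path1[-1] IndexError), and a wall row shorter than the first row (walls[i][j] IndexError).
def Pre_getLabirint (walls : List (List Int)) (path1 : List (Int × Int)) (path2 : List (Int × Int)) : Prop :=
  walls ≠ [] ∧ path1 ≠ [] ∧ ∀ row ∈ walls, (walls.headD []).length ≤ row.length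
instance (walls : List (List Int)) (path1 : List (Int × Int)) (path2 : List (Int × Int)) : Decidable (Pre_getLabirint walls path1 path2) := by unfold Pre_getLabirint; infer_instance

def pvWitness_getLabirint : List (List Int) × (List (Int × Int)) × (List (Int × Int)) :=
  ([[0, 0, 1], [0, 1, 0], [0, 0, 0]], [(0, 0), (1, 0), (2, 0), (2, 1), (2, 2)], [(0, 1), (1, 0)])

def Spec_getLabirint (walls : List (List Int)) (path1 : List (Int × Int)) (path2 : List (Int × Int)) (out : String) : Prop := out = getLabirint_alt walls path1 path2
instance (walls : List (List Int)) (path1 : List (Int × Int)) (path2 : List (Int × Int)) (out : String) : Decidable (Spec_getLabirint walls path1 path2 out) := by unfold Spec_getLabirint; infer_instance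

-- ===== CLAIM (what is proved, stated in full; the proofs are below) =====
def Claim_equal_getLabirint : Prop := ∀ (walls : List (List Int)) (path1 : List (Int × Int)) (path2 : List (Int × Int)), Dom_getLabirint walls path1 path2 → Pre_getLabirint walls path1 path2 → Spec_getLabirint walls path1 path2 (getLabirint walls path1 path2)

-- ===== LEMMAS AND PROOFS =====
theorem pvSet2_getD_len (g : List (List Char)) (i j : Int) (c : Char) (k : Nat) :
    ((pvSet2 g i j c).getD k []).length = (g.getD k []).length := by
  by_cases hik : i.toNat = k
  · subst hik
    by_cases hlen : i.toNat < g.length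
    · simp [pvSet2, List.getD_eq_getElem?_getD, List.getElem?_set, hlen,
        List.getElem?_eq_getElem hlen]
    · simp [pvSet2, List.getD_eq_getElem?_getD, List.getElem?_set, hlen,
        List.getElem?_eq_none (by omega : g.length ≤ i.toNat)]
  · simp [pvSet2, List.getD_eq_getElem?_getD, List.getElem?_set, hik]

theorem pvGet2_pvSet2_same (g : List (List Char)) (i j : Int) (c : Char)
    (h1 : i.toNat < g.length) (h2 : j.toNat < (g.getD i.toNat []).length) :
    pvGet2 (pvSet2 g i j c) i.toNat j.toNat = c := by
  have h2' : j.toNat < (g[i.toNat]?.getD []).length := by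
    simpa [List.getD_eq_getElem?_getD] using h2
  have h2'' : j.toNat < g[i.toNat].length := by
    simpa [List.getElem?_eq_getElem h1] using h2'
  simp [pvGet2, pvSet2, List.getD_eq_getElem?_getD, List.getElem?_set, h1, h2'']

theorem pvGet2_pvSet2_ne (g : List (List Char)) (i j : Int) (c : Char) (k l : Nat)
    (h : ¬(i.toNat = k ∧ j.toNat = l)) :
    pvGet2 (pvSet2 g i j c) k l = pvGet2 g k l := by
  by_cases hik : i.toNat = k
  · have hjl : j.toNat ≠ l := fun hl => h ⟨hik, hl⟩
    subst hik
    by_cases hlen : i.toNat < g.length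
    · simp [pvGet2, pvSet2, List.getD_eq_getElem?_getD, List.getElem?_set, hlen, hjl]
    · simp [pvGet2, pvSet2, List.getD_eq_getElem?_getD, List.getElem?_set, hlen]
  · simp [pvGet2, pvSet2, List.getD_eq_getElem?_getD, List.getElem?_set, hik]

def pvShape (g : List (List Char)) (nn mm : Nat) : Prop :=
  g.length = nn ∧ ∀ k, k < nn → (g.getD k []).length = mm

theorem pvShape_pvSet2 (g : List (List Char)) (nn mm : Nat) (i j : Int) (c : Char)
    (h : pvShape g nn mm) : pvShape (pvSet2 g i j c) nn mm :=
  ⟨by rw [pvSet2] ; simp [h.1], fun k hk => by rw [pvSet2_getD_len]; exact h.2 k hk⟩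

theorem pvFree_spec (walls : List (List Int)) (n m i j : Int) (h : pvFree walls n m i j = true) :
    0 ≤ i ∧ i < n ∧ 0 ≤ j ∧ j < m := by
  simp [pvFree] at h; tauto

theorem pvPaint_get2 (walls : List (List Int)) (nn mm : Nat) (f : Char → Char)
    (L : List (Int × Int)) (hnd : L.Nodup) (g : List (List Char)) (hs : pvShape g nn mm)
    (k l : Nat) (hk : k < nn) (hl : l < mm) :
    pvGet2 (L.foldl (fun g c => if pvFree walls (nn : Int) (mm : Int) c.1 c.2 then
        pvSet2 g c.1 c.2 (f (pvGet2 g c.1.toNat c.2.toNat)) else g) g) k l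
      = if ((k : Int), (l : Int)) ∈ L ∧ pvFree walls (nn : Int) (mm : Int) (k : Int) (l : Int) = true
        then f (pvGet2 g k l) else pvGet2 g k l := by
  induction L generalizing g with
  | nil => simp
  | cons c L ih =>
      simp only [List.foldl_cons, List.mem_cons, List.nodup_cons] at *
      by_cases hc : c = ((k : Int), (l : Int))
      · have ck : c.1 = (k : Int) := by rw [hc]
        have cl : c.2 = (l : Int) := by rw [hc]
        rw [ck, cl]
        simp only [Int.toNat_natCast]
        by_cases hp : pvFree walls (nn : Int) (mm : Int) (k : Int) (l : Int) = true
        · rw [if_pos hp]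
          have hs' := pvShape_pvSet2 g nn mm (k : Int) (l : Int) (f (pvGet2 g k l)) hs
          rw [ih hnd.2 _ hs']
          rw [if_neg (by rintro ⟨hm, -⟩; exact hnd.1 (hc ▸ hm))]
          have hsame : pvGet2 (pvSet2 g (k : Int) (l : Int) (f (pvGet2 g k l))) k l
              = f (pvGet2 g k l) := by
            have := pvGet2_pvSet2_same g (k : Int) (l : Int) (f (pvGet2 g k l))
              (by simp [hs.1]; omega) (by simp only [Int.toNat_natCast]; rw [hs.2 k hk]; omega)
            simpa using this
          rw [hsame, if_pos ⟨Or.inl hc.symm, hp⟩]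
        · rw [if_neg hp, ih hnd.2 _ hs]
          rw [if_neg (by rintro ⟨-, h2⟩; exact hp h2), if_neg (by rintro ⟨-, h2⟩; exact hp h2)]
      · have hstep : pvGet2 (if pvFree walls (nn : Int) (mm : Int) c.1 c.2 then
              pvSet2 g c.1 c.2 (f (pvGet2 g c.1.toNat c.2.toNat)) else g) k l = pvGet2 g k l := by
          split
          · next hp =>
              obtain ⟨h1, _, h3, _⟩ := pvFree_spec _ _ _ _ _ hp
              refine pvGet2_pvSet2_ne _ _ _ _ _ _ ?_
              rintro ⟨e1, e2⟩
              exact hc (Prod.ext (by omega) (by omega))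
          · rfl
        have hs2 : pvShape (if pvFree walls (nn : Int) (mm : Int) c.1 c.2 then
              pvSet2 g c.1 c.2 (f (pvGet2 g c.1.toNat c.2.toNat)) else g) nn mm := by
          split
          · exact pvShape_pvSet2 _ _ _ _ _ _ hs
          · exact hs
        rw [ih hnd.2 _ hs2, hstep]
        have hne : ¬ ((k : Int), (l : Int)) = c := fun e => hc e.symm
        simp [hne]

def pvW (walls : List (List Int)) (i j : Int) : Int :=
  PySem.List.pyGetD (PySem.List.pyGetD walls i []) j 1

def pvCell (walls : List (List Int)) (p1 p2 : PySem.Set (Int × Int)) (fin : Int × Int) (i j : Int) : Char :=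
  if pvW walls i j == 0 then
    if p1.contains (i, j) && p2.contains (i, j) then ';'
    else if p1.contains (i, j) then '.'
    else if p2.contains (i, j) then ','
    else if (i, j) == fin then '*'
    else ' '
  else '#'

theorem getLabirint_eq (walls : List (List Int)) (path1 path2 : List (Int × Int)) :
    getLabirint walls path1 path2 = String.ofList
      ((PySem.List.pyRange 0 (walls.length : Int) 1).flatMap (fun i =>
        (PySem.List.pyRange 0 ((((PySem.List.pyGet? walls 0).getD []).length : Int)) 1).map (fun j =>
          pvCell walls (PySem.Set.ofList path1.dropLast) (PySem.Set.ofList path2.dropLast)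
            ((PySem.List.pyGet? path1 (-1)).getD (0, 0)) i j) ++ ['\n'])) := by
  unfold getLabirint
  simp only [PySem.List.slice_to_neg_one, PySem.List.foldl_append_singleton_eq_map,
    List.append_assoc, PySem.List.foldl_append_eq_flatMap, List.nil_append, pvCell, pvW]
  rfl

theorem pvShape_grid0 (walls : List (List Int)) (nn mm : Nat) :
    pvShape (pvGrid0 walls (nn : Int) (mm : Int)) nn mm := by
  constructor
  · simp [pvGrid0, PySem.List.length_pyRange_one]
  · intro k hk
    rw [List.getD_eq_getElem?_getD]
    unfold pvGrid0
    rw [PySem.List.getElem?_map_pyRange_zero _ nn k hk]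
    simp [PySem.List.length_pyRange_one]

theorem pvGet2_grid0 (walls : List (List Int)) (nn mm k l : Nat) (hk : k < nn) (hl : l < mm) :
    pvGet2 (pvGrid0 walls (nn : Int) (mm : Int)) k l
      = if pvW walls (k : Int) (l : Int) != 0 then '#' else ' ' := by
  unfold pvGet2 pvGrid0
  simp only [List.getD_eq_getElem?_getD]
  rw [PySem.List.getElem?_map_pyRange_zero _ nn k hk]
  simp only [Option.getD_some]
  rw [PySem.List.getElem?_map_pyRange_zero _ mm l hl]
  simp [pvW]

theorem pvFree_nat (walls : List (List Int)) (nn mm k l : Nat) (hk : k < nn) (hl : l < mm) :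
    pvFree walls (nn : Int) (mm : Int) (k : Int) (l : Int) = (pvW walls (k : Int) (l : Int) == 0) := by
  have h1 : (k : Int) < (nn : Int) := by exact_mod_cast hk
  have h2 : (l : Int) < (mm : Int) := by exact_mod_cast hl
  simp [pvFree, pvW, h1, h2]

theorem pvShape_paint (walls : List (List Int)) (nn mm : Nat) (F : List (List Char) → Int × Int → Char)
    (L : List (Int × Int)) (g : List (List Char)) (hs : pvShape g nn mm) :
    pvShape (L.foldl (fun g c => if pvFree walls (nn : Int) (mm : Int) c.1 c.2 then
        pvSet2 g c.1 c.2 (F g c) else g) g) nn mm := by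
  induction L generalizing g with
  | nil => exact hs
  | cons c L ih =>
      simp only [List.foldl_cons]
      split
      · exact ih _ (pvShape_pvSet2 _ _ _ _ _ _ hs)
      · exact ih _ hs

theorem pvG1_get2 (walls : List (List Int)) (fin : Int × Int) (nn mm k l : Nat)
    (hk : k < nn) (hl : l < mm) :
    pvGet2 (if pvFree walls (nn : Int) (mm : Int) fin.1 fin.2 then
        pvSet2 (pvGrid0 walls (nn : Int) (mm : Int)) fin.1 fin.2 '*'
      else pvGrid0 walls (nn : Int) (mm : Int)) k l
    = if fin = ((k : Int), (l : Int)) ∧ pvW walls (k : Int) (l : Int) = 0 then '*'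
      else pvGet2 (pvGrid0 walls (nn : Int) (mm : Int)) k l := by
  obtain ⟨f1, f2⟩ := fin
  have hs0 := pvShape_grid0 walls nn mm
  by_cases hfree : pvFree walls (nn : Int) (mm : Int) f1 f2 = true
  · rw [if_pos hfree]
    by_cases hfin : ((f1, f2) : Int × Int) = ((k : Int), (l : Int))
    · have e1 : f1 = (k : Int) := congrArg Prod.fst hfin
      have e2 : f2 = (l : Int) := congrArg Prod.snd hfin
      subst e1; subst e2
      have hw0 : pvW walls (k : Int) (l : Int) = 0 := by
        have := (pvFree_nat walls nn mm k l hk hl) ▸ hfree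
        simpa [beq_iff_eq] using this
      rw [if_pos ⟨rfl, hw0⟩]
      have := pvGet2_pvSet2_same (pvGrid0 walls (nn : Int) (mm : Int)) (k : Int) (l : Int) '*'
        (by simp only [Int.toNat_natCast]; rw [hs0.1]; exact hk)
        (by simp only [Int.toNat_natCast]; rw [hs0.2 k hk]; exact hl)
      simpa using this
    · rw [if_neg (fun h => hfin h.1)]
      obtain ⟨h1, _, h3, _⟩ := pvFree_spec _ _ _ _ _ hfree
      exact pvGet2_pvSet2_ne _ _ _ _ _ _
        (by rintro ⟨e1, e2⟩; exact hfin (Prod.ext (by omega) (by omega)))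
  · rw [if_neg hfree, if_neg ?_]
    · rintro ⟨hfin, hw0⟩
      apply hfree
      have e1 : f1 = (k : Int) := congrArg Prod.fst hfin
      have e2 : f2 = (l : Int) := congrArg Prod.snd hfin
      rw [e1, e2, pvFree_nat walls nn mm k l hk hl]
      simp [beq_iff_eq, hw0]

theorem pvCell_g3 (walls : List (List Int)) (S1 S2 : List (Int × Int))
    (hnd1 : S1.Nodup) (hnd2 : S2.Nodup) (fin : Int × Int) (nn mm k l : Nat)
    (hk : k < nn) (hl : l < mm) :
    pvGet2 (S1.foldl (fun g c => if pvFree walls (nn : Int) (mm : Int) c.1 c.2 then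
        pvSet2 g c.1 c.2 (if pvGet2 g c.1.toNat c.2.toNat == ',' then ';' else '.') else g)
      (S2.foldl (fun g c => if pvFree walls (nn : Int) (mm : Int) c.1 c.2 then pvSet2 g c.1 c.2 ',' else g)
        (if pvFree walls (nn : Int) (mm : Int) fin.1 fin.2 then
            pvSet2 (pvGrid0 walls (nn : Int) (mm : Int)) fin.1 fin.2 '*'
          else pvGrid0 walls (nn : Int) (mm : Int)))) k l
    = pvCell walls S1 S2 fin (k : Int) (l : Int) := by
  have hs0 := pvShape_grid0 walls nn mm
  have hs1 : pvShape (if pvFree walls (nn : Int) (mm : Int) fin.1 fin.2 then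
      pvSet2 (pvGrid0 walls (nn : Int) (mm : Int)) fin.1 fin.2 '*'
    else pvGrid0 walls (nn : Int) (mm : Int)) nn mm := by
    split
    · exact pvShape_pvSet2 _ _ _ _ _ _ hs0
    · exact hs0
  have hs2 : pvShape (S2.foldl (fun g c => if pvFree walls (nn : Int) (mm : Int) c.1 c.2 then
      pvSet2 g c.1 c.2 ',' else g)
      (if pvFree walls (nn : Int) (mm : Int) fin.1 fin.2 then
          pvSet2 (pvGrid0 walls (nn : Int) (mm : Int)) fin.1 fin.2 '*'
        else pvGrid0 walls (nn : Int) (mm : Int))) nn mm :=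
    pvShape_paint walls nn mm (fun _ _ => ',') S2 _ hs1
  have h3 : pvGet2 (S1.foldl (fun g c => if pvFree walls (nn : Int) (mm : Int) c.1 c.2 then
        pvSet2 g c.1 c.2 (if pvGet2 g c.1.toNat c.2.toNat == ',' then ';' else '.') else g)
      (S2.foldl (fun g c => if pvFree walls (nn : Int) (mm : Int) c.1 c.2 then pvSet2 g c.1 c.2 ',' else g)
        (if pvFree walls (nn : Int) (mm : Int) fin.1 fin.2 then
            pvSet2 (pvGrid0 walls (nn : Int) (mm : Int)) fin.1 fin.2 '*'
          else pvGrid0 walls (nn : Int) (mm : Int)))) k l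
      = if ((k : Int), (l : Int)) ∈ S1 ∧ pvFree walls (nn : Int) (mm : Int) (k : Int) (l : Int) = true
        then (if pvGet2 (S2.foldl (fun g c => if pvFree walls (nn : Int) (mm : Int) c.1 c.2 then pvSet2 g c.1 c.2 ',' else g)
          (if pvFree walls (nn : Int) (mm : Int) fin.1 fin.2 then
              pvSet2 (pvGrid0 walls (nn : Int) (mm : Int)) fin.1 fin.2 '*'
            else pvGrid0 walls (nn : Int) (mm : Int))) k l == ',' then ';' else '.')
        else pvGet2 (S2.foldl (fun g c => if pvFree walls (nn : Int) (mm : Int) c.1 c.2 then pvSet2 g c.1 c.2 ',' else g)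
          (if pvFree walls (nn : Int) (mm : Int) fin.1 fin.2 then
              pvSet2 (pvGrid0 walls (nn : Int) (mm : Int)) fin.1 fin.2 '*'
            else pvGrid0 walls (nn : Int) (mm : Int))) k l :=
    pvPaint_get2 walls nn mm (fun ch => if ch == ',' then ';' else '.') S1 hnd1 _ hs2 k l hk hl
  have h2 : pvGet2 (S2.foldl (fun g c => if pvFree walls (nn : Int) (mm : Int) c.1 c.2 then pvSet2 g c.1 c.2 ',' else g)
        (if pvFree walls (nn : Int) (mm : Int) fin.1 fin.2 then
            pvSet2 (pvGrid0 walls (nn : Int) (mm : Int)) fin.1 fin.2 '*'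
          else pvGrid0 walls (nn : Int) (mm : Int))) k l
      = if ((k : Int), (l : Int)) ∈ S2 ∧ pvFree walls (nn : Int) (mm : Int) (k : Int) (l : Int) = true
        then ','
        else pvGet2 (if pvFree walls (nn : Int) (mm : Int) fin.1 fin.2 then
            pvSet2 (pvGrid0 walls (nn : Int) (mm : Int)) fin.1 fin.2 '*'
          else pvGrid0 walls (nn : Int) (mm : Int)) k l :=
    pvPaint_get2 walls nn mm (fun _ => ',') S2 hnd2 _ hs1 k l hk hl
  rw [h3, h2, pvG1_get2 walls fin nn mm k l hk hl, pvGet2_grid0 walls nn mm k l hk hl,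
    pvFree_nat walls nn mm k l hk hl]
  by_cases hw : pvW walls (k : Int) (l : Int) = 0
  · by_cases m1 : ((k : Int), (l : Int)) ∈ S1
    · have c1 : PySem.Set.contains S1 ((k : Int), (l : Int)) = true := (PySem.Set.contains_iff _ _).mpr m1
      by_cases m2 : ((k : Int), (l : Int)) ∈ S2
      · have c2 : PySem.Set.contains S2 ((k : Int), (l : Int)) = true := (PySem.Set.contains_iff _ _).mpr m2
        simp [pvCell, hw, m1, m2, c1, c2]
      · have c2 : PySem.Set.contains S2 ((k : Int), (l : Int)) = false := by
          rw [← Bool.not_eq_true]; exact fun h => m2 ((PySem.Set.contains_iff _ _).mp h)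
        by_cases hfin : fin = ((k : Int), (l : Int))
        · simp [pvCell, hw, m1, m2, c1, c2, hfin]
        · simp [pvCell, hw, m1, m2, c1, c2, hfin]
    · have c1 : PySem.Set.contains S1 ((k : Int), (l : Int)) = false := by
        rw [← Bool.not_eq_true]; exact fun h => m1 ((PySem.Set.contains_iff _ _).mp h)
      by_cases m2 : ((k : Int), (l : Int)) ∈ S2
      · have c2 : PySem.Set.contains S2 ((k : Int), (l : Int)) = true := (PySem.Set.contains_iff _ _).mpr m2
        simp [pvCell, hw, m1, m2, c1, c2]
      · have c2 : PySem.Set.contains S2 ((k : Int), (l : Int)) = false := by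
          rw [← Bool.not_eq_true]; exact fun h => m2 ((PySem.Set.contains_iff _ _).mp h)
        by_cases hfin : fin = ((k : Int), (l : Int))
        · simp [pvCell, hw, m1, m2, c1, c2, hfin]
        · have hne : (((k : Int), (l : Int)) == fin) = false := by
            rw [← Bool.not_eq_true, beq_iff_eq]; exact fun h => hfin h.symm
          simp [pvCell, hw, m1, m2, c1, c2, hfin, hne]
  · simp [pvCell, hw]

theorem pvRow_getElem? (g : List (List Char)) (nn mm : Nat) (hs : pvShape g nn mm)
    (k l : Nat) (hk : k < nn) (hkg : k < g.length) (hl : l < mm) :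
    (g[k])[l]? = some (pvGet2 g k l) := by
  have hrow : g[k] = g.getD k [] := by
    rw [List.getD_eq_getElem?_getD, List.getElem?_eq_getElem hkg]; rfl
  have hl' : l < (g.getD k []).length := by rw [hs.2 k hk]; exact hl
  have hl2 : l < (g[k]?.getD []).length := by
    simpa [List.getD_eq_getElem?_getD] using hl'
  rw [hrow, List.getElem?_eq_getElem hl']
  simp [pvGet2, List.getD_eq_getElem?_getD, List.getElem?_eq_getElem hl2]

theorem pvEqMap_of (g : List (List Char)) (nn mm : Nat) (hs : pvShape g nn mm)
    (F : Int → Int → Char) (h : ∀ k l : Nat, k < nn → l < mm → pvGet2 g k l = F (k : Int) (l : Int)) :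
    g = (PySem.List.pyRange 0 (nn : Int) 1).map (fun i =>
        (PySem.List.pyRange 0 (mm : Int) 1).map (fun j => F i j)) := by
  refine List.ext_getElem? fun k => ?_
  by_cases hk : k < nn
  · have hkg : k < g.length := by rw [hs.1]; exact hk
    rw [List.getElem?_eq_getElem hkg, PySem.List.getElem?_map_pyRange_zero _ nn k hk]
    congr 1
    refine List.ext_getElem? fun l => ?_
    by_cases hl : l < mm
    · rw [pvRow_getElem? _ nn mm hs k l hk hkg hl,
        PySem.List.getElem?_map_pyRange_zero _ mm l hl, h k l hk hl]
    · rw [List.getElem?_eq_none, List.getElem?_eq_none]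
      · simp [PySem.List.length_pyRange_one]; omega
      · have hrow : g[k] = g.getD k [] := by
          rw [List.getD_eq_getElem?_getD, List.getElem?_eq_getElem hkg]; rfl
        rw [hrow, hs.2 k hk]; omega
  · rw [List.getElem?_eq_none, List.getElem?_eq_none]
    · simp [PySem.List.length_pyRange_one]; omega
    · rw [hs.1]; omega

theorem pvG3_eq_map (walls : List (List Int)) (S1 S2 : List (Int × Int))
    (hnd1 : S1.Nodup) (hnd2 : S2.Nodup) (fin : Int × Int) (nn mm : Nat) :
    (S1.foldl (fun g c => if pvFree walls (nn : Int) (mm : Int) c.1 c.2 then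
        pvSet2 g c.1 c.2 (if pvGet2 g c.1.toNat c.2.toNat == ',' then ';' else '.') else g)
      (S2.foldl (fun g c => if pvFree walls (nn : Int) (mm : Int) c.1 c.2 then pvSet2 g c.1 c.2 ',' else g)
        (if pvFree walls (nn : Int) (mm : Int) fin.1 fin.2 then
            pvSet2 (pvGrid0 walls (nn : Int) (mm : Int)) fin.1 fin.2 '*'
          else pvGrid0 walls (nn : Int) (mm : Int))))
    = (PySem.List.pyRange 0 (nn : Int) 1).map (fun i =>
        (PySem.List.pyRange 0 (mm : Int) 1).map (fun j => pvCell walls S1 S2 fin i j)) := by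
  have hs0 := pvShape_grid0 walls nn mm
  have hs1 : pvShape (if pvFree walls (nn : Int) (mm : Int) fin.1 fin.2 then
      pvSet2 (pvGrid0 walls (nn : Int) (mm : Int)) fin.1 fin.2 '*'
    else pvGrid0 walls (nn : Int) (mm : Int)) nn mm := by
    split
    · exact pvShape_pvSet2 _ _ _ _ _ _ hs0
    · exact hs0
  have hs2 := pvShape_paint walls nn mm (fun _ _ => ',') S2 _ hs1
  have hs3 := pvShape_paint walls nn mm
    (fun g c => if pvGet2 g c.1.toNat c.2.toNat == ',' then ';' else '.') S1 _ hs2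
  exact pvEqMap_of _ nn mm hs3 _ (fun k l hk hl => pvCell_g3 walls S1 S2 hnd1 hnd2 fin nn mm k l hk hl)

theorem getLabirint_alt_eq (walls : List (List Int)) (path1 path2 : List (Int × Int)) :
    getLabirint_alt walls path1 path2 = String.ofList
      ((PySem.List.pyRange 0 (walls.length : Int) 1).flatMap (fun i =>
        (PySem.List.pyRange 0 ((((PySem.List.pyGet? walls 0).getD []).length : Int)) 1).map (fun j =>
          pvCell walls (PySem.Set.ofList path1.dropLast) (PySem.Set.ofList path2.dropLast)
            ((PySem.List.pyGet? path1 (-1)).getD (0, 0)) i j) ++ ['\n'])) := by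
  unfold getLabirint_alt
  simp only [PySem.List.slice_to_neg_one]
  rw [pvG3_eq_map walls (PySem.Set.ofList path1.dropLast) (PySem.Set.ofList path2.dropLast)
    (PySem.Set.nodup_ofList _) (PySem.Set.nodup_ofList _)
    ((PySem.List.pyGet? path1 (-1)).getD (0, 0)) walls.length
    (((PySem.List.pyGet? walls 0).getD []).length)]
  simp only [List.flatMap_def, List.map_map]
  rfl

-- ===== VERDICT (by name: the statement is the Claim_ definition above) =====
theorem getLabirint_spec : Claim_equal_getLabirint := by
  intro walls path1 path2 _ _
  unfold Spec_getLabirint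
  rw [getLabirint_eq, getLabirint_alt_eq]
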